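-- pv_equiv track=rewrite | github.com/MinaPecheux/Advent-Of-Code | 2018/Python/day4.py | strategy2
-- ===== SOURCE A (Python) =====
-- from collections import Counter
--
-- def strategy2(inputs):
--     '''Applies the second strategy - computes which guard is most frequently
--     asleep on the same minute.
--
--     :param claims: List of event inputs.
--     :type claims: list(tuple(int))
--     '''
--     guards = {}
--     time = -1
--     for (min, guard_id, action) in inputs:
--         if action == 0:
--             time = min
--         else:
--             time_range = list(range(time, min))
--             if guard_id in guards:
--                 guards[guard_id].extend(time_range)
--             else:
--                 guards[guard_id] = time_range
--     sortable_guards = [ (guard, Counter(r).most_common()[0]) \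
--         for guard, r in guards.items() ]
--     sortable_guards = sorted(sortable_guards, key=lambda x: x[1][1], reverse=True)
--     most_asleep_guard = sortable_guards[0]
--     most_asleep_min = most_asleep_guard[1][0]
--     return most_asleep_guard[0] * most_asleep_min
-- ===== SOURCE B (Python) =====
-- from collections import Counter
--
-- def strategy2(inputs):
--     # One streaming pass builds per-guard minute->count tables; then an explicit
--     # nested argmax (strict >) over guards/minutes in insertion order replaces
--     # A's per-guard minute lists, Counter.most_common() and the final sort.
--     counts = {}
--     time = -1
--     for (min, guard_id, action) in inputs:
--         if action == 0:
--             time = min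
--         else:
--             counts.setdefault(guard_id, Counter()).update(range(time, min))
--     best_guard = 0
--     best_minute = 0
--     best_count = 0
--     for guard_id, table in counts.items():
--         for m, c in table.items():
--             if best_count < c:
--                 best_guard, best_minute, best_count = guard_id, m, c
--     return best_guard * best_minute
-- ===== Notes on version B (the rewrite author's own statement) =====
-- stated objective: alternative
-- what changed: B streams events into a per-guard minute->count dict-of-dicts and picks the answer with an explicit nested strictly-greater argmax over guards and minutes in insertion order, instead of A's per-guard minute lists, Counter.most_common() per guard and a final stable sort.
import Mathlib
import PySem

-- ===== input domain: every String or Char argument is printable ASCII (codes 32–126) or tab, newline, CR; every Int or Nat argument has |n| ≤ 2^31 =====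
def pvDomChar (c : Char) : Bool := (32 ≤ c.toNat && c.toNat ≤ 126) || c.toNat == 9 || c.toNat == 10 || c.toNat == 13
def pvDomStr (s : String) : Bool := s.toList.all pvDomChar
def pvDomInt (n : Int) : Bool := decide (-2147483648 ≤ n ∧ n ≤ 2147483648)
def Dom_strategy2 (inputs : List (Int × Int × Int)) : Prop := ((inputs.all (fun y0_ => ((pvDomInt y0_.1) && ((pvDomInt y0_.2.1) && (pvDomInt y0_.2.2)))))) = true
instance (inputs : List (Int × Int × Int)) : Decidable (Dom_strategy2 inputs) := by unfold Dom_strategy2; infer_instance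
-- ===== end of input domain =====

-- B replaces A's per-guard minute lists + Counter.most_common + sort by a dict-of-counters built
-- in one streaming pass and an explicit nested strict-> argmax; same return value on Pre_.

-- Port helpers for the Python library calls, computed hash-based so evaluation is fast;
-- each is PROVEN equal to the PySem model of the Python call it ports (theorems
-- pvCounter_eq, pvSortedSnd_eq, pvCounterUpd_eq below):
--   pvCounter xs     = PySem.Dict.counter xs                      (collections.Counter(xs))
--   pvCounterUpd d l = the counter d updated by the elements of l (Counter.update(iterable))
--   pvSortedSnd q    = PySem.List.sorted q (fun x => x.2) true    (sorted(q, key=itemgetter(1), reverse=True))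
def pvUpdDedup (s : List Int) (l : List Int) : List Int :=
  s ++ (l.foldl (fun (st : Std.HashSet Int × List Int) x =>
      if st.1.contains x then st else (st.1.insert x, x :: st.2))
    (Std.HashSet.ofList s, [])).2.reverse


def pvHashOfItems (L : List (Int × Int)) : Std.HashMap Int Int :=
  L.foldl (fun h p => h.insert p.1 p.2) ∅


def pvCountHash (l : List Int) : Std.HashMap Int Int :=
  l.foldl (fun h x => h.insert x (h.getD x 0 + 1)) ∅


def pvCounterUpd (d : PySem.Dict Int Int) (l : List Int) : PySem.Dict Int Int :=
  let hd := pvHashOfItems d.items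
  let hc := pvCountHash l
  PySem.Dict.mk ((pvUpdDedup d.keys l).map (fun k => (k, hd.getD k 0 + hc.getD k 0)))


def pvCounter (xs : List Int) : PySem.Dict Int Int := pvCounterUpd PySem.Dict.empty xs


def pvLeT (a b : (Int × Int) × Nat) : Bool :=
  decide (b.1.2 < a.1.2 ∨ (a.1.2 = b.1.2 ∧ a.2 ≤ b.2))


def pvSortedSnd (q : List (Int × Int)) : List (Int × Int) :=
  (q.zipIdx.mergeSort pvLeT).map (·.1)


-- ===== PORT A =====
def strategy2 (inputs : List (Int × Int × Int)) : Int :=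
  -- the loop building `guards` (dict guard_id -> list of asleep minutes) and `time`
  let st := inputs.foldl (fun (s : Int × PySem.Dict Int (List Int)) e =>
      if e.2.2 == 0 then (e.1, s.2)
      else
        if s.2.contains e.2.1 then (s.1, s.2.modify e.2.1 [] (· ++ PySem.List.pyRange s.1 e.1 1))
        else (s.1, s.2.insert e.2.1 (PySem.List.pyRange s.1 e.1 1)))
    (-1, PySem.Dict.empty)
  -- sortable_guards = [(g, Counter(r).most_common()[0]) …]; most_common = sorted(items, key=snd, reverse)
  let sortable := st.2.items.map (fun gr =>
      (gr.1, (PySem.List.pyGet? (pvSortedSnd (pvCounter gr.2).items) 0).getD (0, 0)))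
  let mag := (PySem.List.pyGet? (PySem.List.sorted sortable (fun x => x.2.2) true) 0).getD (0, (0, 0))
  mag.1 * mag.2.1

-- ===== PORT B =====
def strategy2_alt (inputs : List (Int × Int × Int)) : Int :=
  -- one pass: per-guard minute->count tables
  let st := inputs.foldl (fun (s : Int × PySem.Dict Int (PySem.Dict Int Int)) e =>
      if e.2.2 == 0 then (e.1, s.2)
      else
        (s.1, s.2.insert e.2.1 (pvCounterUpd (s.2.getD e.2.1 PySem.Dict.empty)
            (PySem.List.pyRange s.1 e.1 1))))
    (-1, (PySem.Dict.empty : PySem.Dict Int (PySem.Dict Int Int)))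
  -- explicit nested argmax, strict >
  let best := st.2.items.foldl (fun b gt =>
      gt.2.items.foldl (fun b p => if b.2.2 < p.2 then (gt.1, p.1, p.2) else b) b)
    ((0 : Int), (0 : Int), (0 : Int))
  best.1 * best.2.1

-- ===== PRECONDITION & SPEC =====
-- pvSleeps describes the input's shape: for each sleep event, its guard and whether the
-- asleep minute range (last wake minute .. event minute) is non-empty.
def pvSleeps (t : Int) : List (Int × Int × Int) → List (Int × Bool)
  | [] => []
  | e :: rest => if e.2.2 == 0 then pvSleeps e.1 rest
                 else (e.2.1, decide (t < e.1)) :: pvSleeps t rest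

-- A raises IndexError when no sleep event exists, or when some guard's sleep events
-- all have an empty minute range (Counter([]).most_common()[0]); Pre_ excludes exactly those.
def Pre_strategy2 (inputs : List (Int × Int × Int)) : Prop :=
  pvSleeps (-1) inputs ≠ [] ∧
    ∀ p ∈ pvSleeps (-1) inputs, ∃ q ∈ pvSleeps (-1) inputs, q.1 = p.1 ∧ q.2 = true
instance (inputs : List (Int × Int × Int)) : Decidable (Pre_strategy2 inputs) := by
  unfold Pre_strategy2; infer_instance

def pvWitness_strategy2 : (List (Int × Int × Int)) := [(5, 7, 0), (8, 7, 1)]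

def Spec_strategy2 (inputs : List (Int × Int × Int)) (out : Int) : Prop := out = strategy2_alt inputs
instance (inputs : List (Int × Int × Int)) (out : Int) : Decidable (Spec_strategy2 inputs out) := by unfold Spec_strategy2; infer_instance

-- ===== CLAIM (what is proved, stated in full; the proofs are below) =====
def Claim_equal_strategy2 : Prop := ∀ (inputs : List (Int × Int × Int)), Dom_strategy2 inputs → Pre_strategy2 inputs → Spec_strategy2 inputs (strategy2 inputs)

-- ===== LEMMAS AND PROOFS =====

theorem pvUpdDedup_aux : ∀ (l : List Int) (seen : Std.HashSet Int) (accR base : List Int),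
    (∀ y : Int, seen.contains y = (base ++ accR.reverse).contains y) →
    base ++ (l.foldl (fun (st : Std.HashSet Int × List Int) x =>
        if st.1.contains x then st else (st.1.insert x, x :: st.2)) (seen, accR)).2.reverse
      = PySem.Set.update (base ++ accR.reverse) l := by
  intro l
  induction l with
  | nil => intro seen accR base _; rfl
  | cons x rest ih =>
    intro seen accR base hinv
    simp only [List.foldl_cons]
    have hupd : PySem.Set.update (base ++ accR.reverse) (x :: rest)
        = PySem.Set.update (PySem.Set.add (base ++ accR.reverse) x) rest := rfl
    rw [hupd]
    by_cases h : seen.contains x = true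
    · rw [if_pos h]
      have hc : (base ++ accR.reverse).contains x = true := by rw [← hinv x]; exact h
      have hadd : PySem.Set.add (base ++ accR.reverse) x = base ++ accR.reverse := by
        unfold PySem.Set.add PySem.Set.contains
        rw [if_pos hc]
      rw [hadd]
      exact ih seen accR base hinv
    · rw [if_neg h]
      have hc : (base ++ accR.reverse).contains x = false := by
        rw [← hinv x]; simpa using h
      have hadd : PySem.Set.add (base ++ accR.reverse) x = base ++ (x :: accR).reverse := by
        unfold PySem.Set.add PySem.Set.contains
        rw [if_neg (by rw [hc]; exact Bool.false_ne_true), List.reverse_cons, ← List.append_assoc]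
      rw [hadd]
      refine ih (seen.insert x) (x :: accR) base ?_
      intro y
      rw [Std.HashSet.contains_insert, hinv y]
      simp only [List.reverse_cons, ← List.append_assoc, List.contains_append, List.contains_cons,
        List.contains_nil]
      by_cases hxy : x = y
      · subst hxy; simp
      · have h1 : (x == y) = false := by simpa using hxy
        have h2 : (y == x) = false := by simpa using (Ne.symm hxy)
        simp [h1, h2]

theorem pvUpdDedup_eq (s l : List Int) : pvUpdDedup s l = PySem.Set.update s l := by
  have := pvUpdDedup_aux l (Std.HashSet.ofList s) [] s (by
    intro y
    simp [Std.HashSet.contains_ofList])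
  simpa [pvUpdDedup] using this


theorem pvHashOfItems_aux : ∀ (L : List (Int × Int)) (h : Std.HashMap Int Int) (k : Int),
    (L.map (·.1)).Nodup →
    (L.foldl (fun h p => h.insert p.1 p.2) h).getD k 0
      = if k ∈ L.map (·.1) then (PySem.Dict.mk L).getD k 0 else h.getD k 0 := by
  intro L
  induction L with
  | nil => intro h k _; simp
  | cons p rest ih =>
    intro h k hnd
    simp only [List.map_cons, List.nodup_cons] at hnd
    simp only [List.foldl_cons, List.map_cons, List.mem_cons]
    rw [ih _ k hnd.2]
    by_cases hk : k ∈ rest.map (·.1)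
    · rw [if_pos hk, if_pos (Or.inr hk)]
      have hne : k ≠ p.1 := fun he => hnd.1 (he ▸ hk)
      have : (PySem.Dict.mk (p :: rest)).getD k 0 = (PySem.Dict.mk rest).getD k 0 := by
        rw [PySem.Dict.getD_eq_get?_getD, PySem.Dict.getD_eq_get?_getD, PySem.Dict.get?_mk_cons,
          if_neg (by simpa using (Ne.symm hne))]
      rw [this]
    · rw [if_neg hk]
      by_cases hkp : k = p.1
      · rw [if_pos (Or.inl hkp), Std.HashMap.getD_insert, if_pos (by simpa using hkp.symm)]
        rw [PySem.Dict.getD_eq_get?_getD, PySem.Dict.get?_mk_cons, if_pos (by simpa using hkp.symm)]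
        rfl
      · rw [if_neg (by simp [hkp, hk]), Std.HashMap.getD_insert,
          if_neg (by simpa using fun he => hkp he.symm)]

theorem pvHashOfItems_eq (d : PySem.Dict Int Int) (hnd : d.keys.Nodup) (k : Int) :
    (pvHashOfItems d.items).getD k 0 = d.getD k 0 := by
  have hkeys : d.keys = d.items.map (·.1) := rfl
  have := pvHashOfItems_aux d.items ∅ k (by rw [← hkeys]; exact hnd)
  rw [pvHashOfItems] at *
  rw [this]
  by_cases hk : k ∈ d.items.map (·.1)
  · rw [if_pos hk]
  · rw [if_neg hk, Std.HashMap.getD_empty]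
    rw [PySem.Dict.getD_of_not_contains d 0 ?_]
    rw [PySem.Dict.contains_eq_decide_mem_keys, hkeys]
    simpa using hk


theorem pvCountHash_aux : ∀ (l : List Int) (h : Std.HashMap Int Int) (k : Int),
    (l.foldl (fun h x => h.insert x (h.getD x 0 + 1)) h).getD k 0
      = h.getD k 0 + (l.count k : Int) := by
  intro l
  induction l with
  | nil => intro h k; simp
  | cons x rest ih =>
    intro h k
    simp only [List.foldl_cons]
    rw [ih]
    by_cases hk : k = x
    · subst hk
      rw [Std.HashMap.getD_insert, if_pos (by simp), List.count_cons_self]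
      push_cast
      ring
    · rw [Std.HashMap.getD_insert]
      split_ifs with hif
      · exact (hk (eq_of_beq hif).symm).elim
      · have hkx : (k == x) = false := beq_false_of_ne hk
        simp [List.count_cons, hkx]
        exact fun he => hk he.symm

theorem pvCountHash_eq (l : List Int) (k : Int) : (pvCountHash l).getD k 0 = (l.count k : Int) := by
  rw [pvCountHash, pvCountHash_aux, Std.HashMap.getD_empty, zero_add]


theorem pvCounterUpd_eq (d : PySem.Dict Int Int) (l : List Int) (hnd : d.keys.Nodup) :
    pvCounterUpd d l = l.foldl (fun t m => t.modify m 0 (· + 1)) d := by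
  apply PySem.Dict.ext
  have hndR : (l.foldl (fun t m => t.modify m 0 (· + 1)) d).keys.Nodup := by
    have := PySem.Dict.nodup_keys_foldl_modify_key l (fun x => x) 0 (fun _ _ v => v + 1) d hnd
    simpa using this
  have hkeysR : (l.foldl (fun t m => t.modify m 0 (· + 1)) d).keys = PySem.Set.update d.keys l := by
    have := PySem.Dict.keys_foldl_modify l 0 (fun _ _ v => v + 1) d
    simpa using this
  rw [PySem.Dict.items_eq_map_keys _ hndR 0, hkeysR]
  show (pvUpdDedup d.keys l).map _ = _
  rw [pvUpdDedup_eq]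
  apply List.map_congr_left
  intro k _
  have hcount := PySem.Dict.getD_foldl_modify_add_one l d k
  simp only [hcount]
  rw [pvHashOfItems_eq d hnd k, pvCountHash_eq]


theorem pvCounter_eq (xs : List Int) : pvCounter xs = PySem.Dict.counter xs := by
  rw [pvCounter, pvCounterUpd_eq PySem.Dict.empty xs PySem.Dict.nodup_keys_empty]
  rfl

def pvKeyT (p : (Int × Int) × Nat) : ℤ ×ₗ ℕ := toLex (-p.1.2, p.2)


theorem pv_bT_eq (x : Int × Int) (i : Nat) (y : (Int × Int) × Nat) (hy : y.2 < i) :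
    (decide (pvKeyT (x, i) < pvKeyT y)) = decide (y.1.2 < x.2) := by
  apply decide_eq_decide.mpr
  unfold pvKeyT
  rw [Prod.Lex.toLex_lt_toLex]
  dsimp only
  constructor
  · rintro (h | ⟨h1, h2⟩)
    · omega
    · exact absurd h2 (by omega)
  · intro h
    left
    omega

theorem pv_T1 : ∀ (acc : List ((Int × Int) × Nat)) (x : Int × Int) (i : Nat),
    (∀ p ∈ acc, p.2 < i) →
    (PySem.List.insertBy (fun a b => decide (pvKeyT a < pvKeyT b)) (x, i) acc).map (·.1)
      = PySem.List.insertBy (fun a b => decide (b.2 < a.2)) x (acc.map (·.1)) := by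
  intro acc
  induction acc with
  | nil => intro x i _; rfl
  | cons y ys ih =>
    intro x i hb
    rw [show PySem.List.insertBy (fun a b => decide (pvKeyT a < pvKeyT b)) (x, i) (y :: ys)
        = if decide (pvKeyT (x, i) < pvKeyT y) then (x, i) :: y :: ys
          else y :: PySem.List.insertBy (fun a b => decide (pvKeyT a < pvKeyT b)) (x, i) ys
        from by simp [PySem.List.insertBy]]
    rw [pv_bT_eq x i y (hb y List.mem_cons_self)]
    simp only [List.map_cons]
    rw [show PySem.List.insertBy (fun a b => decide (b.2 < a.2)) x (y.1 :: ys.map (·.1))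
        = if decide (y.1.2 < x.2) then x :: y.1 :: ys.map (·.1)
          else y.1 :: PySem.List.insertBy (fun a b => decide (b.2 < a.2)) x (ys.map (·.1))
        from by simp [PySem.List.insertBy]]
    by_cases h : y.1.2 < x.2
    · simp only [decide_eq_true_eq, if_pos h, List.map_cons]
    · simp only [decide_eq_true_eq, if_neg h, List.map_cons]
      rw [ih x i (fun p hp => hb p (List.mem_cons_of_mem _ hp))]

theorem pv_T2 : ∀ (q : List (Int × Int)) (n : Nat) (accT : List ((Int × Int) × Nat)),
    (∀ p ∈ accT, p.2 < n) →
    ((q.zipIdx n).foldl (fun acc x => PySem.List.insertBy (fun a b => decide (pvKeyT a < pvKeyT b)) x acc) accT).map (·.1)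
      = q.foldl (fun acc x => PySem.List.insertBy (fun a b => decide (b.2 < a.2)) x acc) (accT.map (·.1)) := by
  intro q
  induction q with
  | nil => intro n accT _; rfl
  | cons x q ih =>
    intro n accT hb
    rw [List.zipIdx_cons]
    simp only [List.foldl_cons]
    rw [← pv_T1 accT x n hb]
    refine ih (n + 1) _ ?_
    intro p hp
    rcases (PySem.List.mem_insertBy _ _ _ _).mp hp with h | h
    · rw [h]; omega
    · exact Nat.lt_succ_of_lt (hb p h)

theorem pvLeT_trans : ∀ (a b c : (Int × Int) × Nat),
    pvLeT a b = true → pvLeT b c = true → pvLeT a c = true := by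
  intro a b c hab hbc
  simp only [pvLeT, decide_eq_true_eq] at *
  omega

theorem pvLeT_total : ∀ (a b : (Int × Int) × Nat), (pvLeT a b || pvLeT b a) = true := by
  intro a b
  simp only [pvLeT, Bool.or_eq_true, decide_eq_true_eq]
  omega

theorem pv_sorted_tagged_eq_mergeSort (q : List (Int × Int)) :
    PySem.List.sorted q.zipIdx pvKeyT = q.zipIdx.mergeSort pvLeT := by
  apply PySem.List.sorted_eq_of_perm_of_pairwise_lt
  · exact List.mergeSort_perm q.zipIdx pvLeT
  · have hpw := List.pairwise_mergeSort pvLeT_trans pvLeT_total q.zipIdx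
    have hnd : ((q.zipIdx.mergeSort pvLeT).map Prod.snd).Nodup := by
      have hperm : ((q.zipIdx.mergeSort pvLeT).map Prod.snd).Perm (q.zipIdx.map Prod.snd) :=
        (List.mergeSort_perm q.zipIdx pvLeT).map Prod.snd
      refine hperm.nodup_iff.mpr ?_
      rw [List.zipIdx_map_snd]
      exact List.nodup_range'
    have hne : (q.zipIdx.mergeSort pvLeT).Pairwise (fun a b => a.2 ≠ b.2) :=
      List.pairwise_map.mp hnd
    refine (hpw.and hne).imp ?_
    rintro a b ⟨hab, hne'⟩
    simp only [pvLeT, decide_eq_true_eq] at hab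
    unfold pvKeyT
    rw [Prod.Lex.toLex_lt_toLex]
    dsimp only
    omega

theorem pvSortedSnd_eq (q : List (Int × Int)) :
    pvSortedSnd q = PySem.List.sorted q (fun x => x.2) true := by
  rw [pvSortedSnd, ← pv_sorted_tagged_eq_mergeSort, PySem.List.sorted_eq_foldl_insertBy,
    PySem.List.sorted_rev_eq_foldl_insertBy]
  exact pv_T2 q 0 [] (by simp)


def pvEvents (t : Int) : List (Int × Int × Int) → List (Int × List Int)
  | [] => []
  | e :: rest => if e.2.2 == 0 then pvEvents e.1 rest
                 else (e.2.1, PySem.List.pyRange t e.1 1) :: pvEvents t rest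

theorem pv_pyRange_ne_nil_iff (a b : Int) : PySem.List.pyRange a b 1 ≠ [] ↔ a < b := by
  constructor
  · intro h
    by_contra hab
    exact h (by simp [PySem.List.pyRange, if_neg hab])
  · intro h
    rw [PySem.List.pyRange_one_cons h]
    exact List.cons_ne_nil _ _

theorem pv_sleeps_eq : ∀ (inputs : List (Int × Int × Int)) (t : Int),
    pvSleeps t inputs = (pvEvents t inputs).map (fun p => (p.1, decide (p.2 ≠ []))) := by
  intro inputs
  induction inputs with
  | nil => intro t; rfl
  | cons e rest ih =>
    intro t
    simp only [pvSleeps, pvEvents]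
    by_cases h : (e.2.2 == 0) = true
    · rw [if_pos h, if_pos h]; exact ih e.1
    · rw [if_neg h, if_neg h, List.map_cons, ih t]
      have : decide (t < e.1) = decide (PySem.List.pyRange t e.1 1 ≠ []) :=
        decide_eq_decide.mpr (pv_pyRange_ne_nil_iff t e.1).symm
      rw [this]

theorem pv_dictA : ∀ (inputs : List (Int × Int × Int)) (t : Int) (G : PySem.Dict Int (List Int)),
    (inputs.foldl (fun (s : Int × PySem.Dict Int (List Int)) e =>
      if e.2.2 == 0 then (e.1, s.2)
      else
        if s.2.contains e.2.1 then (s.1, s.2.modify e.2.1 [] (· ++ PySem.List.pyRange s.1 e.1 1))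
        else (s.1, s.2.insert e.2.1 (PySem.List.pyRange s.1 e.1 1))) (t, G)).2
    = (pvEvents t inputs).foldl (fun d p => d.modify p.1 [] (· ++ p.2)) G := by
  intro inputs
  induction inputs with
  | nil => intro t G; rfl
  | cons e rest ih =>
    intro t G
    simp only [List.foldl_cons, pvEvents]
    by_cases h : (e.2.2 == 0) = true
    · rw [if_pos h, if_pos h]; exact ih e.1 G
    · rw [if_neg h, if_neg h]
      by_cases hc : G.contains e.2.1 = true
      · rw [if_pos hc]
        simp only [List.foldl_cons]
        exact ih t _
      · rw [if_neg hc]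
        have hc' : G.contains e.2.1 = false := by simpa using hc
        have hins : G.insert e.2.1 (PySem.List.pyRange t e.1 1)
            = G.modify e.2.1 [] (· ++ PySem.List.pyRange t e.1 1) := by
          simp [PySem.Dict.modify, PySem.Dict.getD_of_not_contains G [] hc']
        simp only [List.foldl_cons, hins]
        exact ih t _

theorem pv_dictB : ∀ (inputs : List (Int × Int × Int)) (t : Int) (C : PySem.Dict Int (PySem.Dict Int Int)),
    (inputs.foldl (fun (s : Int × PySem.Dict Int (PySem.Dict Int Int)) e =>
      if e.2.2 == 0 then (e.1, s.2)
      else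
        (s.1, s.2.insert e.2.1 (pvCounterUpd (s.2.getD e.2.1 PySem.Dict.empty)
            (PySem.List.pyRange s.1 e.1 1)))) (t, C)).2
    = (pvEvents t inputs).foldl (fun d p => d.insert p.1 (pvCounterUpd (d.getD p.1 PySem.Dict.empty) p.2)) C := by
  intro inputs
  induction inputs with
  | nil => intro t C; rfl
  | cons e rest ih =>
    intro t C
    simp only [List.foldl_cons, pvEvents]
    by_cases h : (e.2.2 == 0) = true
    · rw [if_pos h, if_pos h]; exact ih e.1 C
    · rw [if_neg h, if_neg h]
      simp only [List.foldl_cons]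
      exact ih t _

def pvRel (G : PySem.Dict Int (List Int)) (C : PySem.Dict Int (PySem.Dict Int Int)) : Prop :=
  C.items = G.items.map (fun p => (p.1, PySem.Dict.counter p.2))

theorem pv_keys_of_rel {G : PySem.Dict Int (List Int)} {C : PySem.Dict Int (PySem.Dict Int Int)}
    (h : pvRel G C) : C.keys = G.keys := by
  unfold pvRel at h
  simp only [PySem.Dict.keys]
  rw [h, List.map_map]
  rfl

theorem pv_getD_of_rel {G : PySem.Dict Int (List Int)} {C : PySem.Dict Int (PySem.Dict Int Int)}
    (h : pvRel G C) (hn : G.keys.Nodup) (g : Int) :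
    C.getD g PySem.Dict.empty = PySem.Dict.counter (G.getD g []) := by
  by_cases hc : G.contains g = true
  · have hk : g ∈ G.keys := (PySem.Dict.contains_iff_mem_keys G g).mp hc
    have hmem : (g, G.getD g []) ∈ G.items := by
      rw [PySem.Dict.items_eq_map_keys G hn []]
      exact List.mem_map.mpr ⟨g, hk, rfl⟩
    have hmemC : (g, PySem.Dict.counter (G.getD g [])) ∈ C.items := by
      rw [h]
      exact List.mem_map.mpr ⟨_, hmem, rfl⟩
    exact PySem.Dict.getD_of_mem_items C hmemC (by rw [pv_keys_of_rel h]; exact hn) _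
  · have hc' : G.contains g = false := by simpa using hc
    have hcC : C.contains g = false := by
      rw [PySem.Dict.contains_eq_decide_mem_keys, pv_keys_of_rel h,
        ← PySem.Dict.contains_eq_decide_mem_keys]
      exact hc'
    rw [PySem.Dict.getD_of_not_contains C PySem.Dict.empty hcC,
      PySem.Dict.getD_of_not_contains G [] hc']
    rfl

theorem pv_counter_fold (r l : List Int) :
    l.foldl (fun t m => t.modify m 0 (· + 1)) (PySem.Dict.counter r)
      = PySem.Dict.counter (r ++ l) := by
  simp only [PySem.Dict.counter, List.foldl_append]

theorem pv_rel_step {G : PySem.Dict Int (List Int)} {C : PySem.Dict Int (PySem.Dict Int Int)}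
    (h : pvRel G C) (hn : G.keys.Nodup) (g : Int) (tr : List Int) :
    pvRel (G.modify g [] (· ++ tr))
      (C.insert g (pvCounterUpd (C.getD g PySem.Dict.empty) tr)) := by
  unfold pvRel
  rw [pv_getD_of_rel h hn, pvCounterUpd_eq _ _ (PySem.Dict.nodup_keys_counter _), pv_counter_fold]
  have hcontains : C.contains g = G.contains g := by
    by_cases hc : G.contains g = true
    · rw [hc, PySem.Dict.contains_eq_decide_mem_keys, pv_keys_of_rel h,
        ← PySem.Dict.contains_eq_decide_mem_keys, hc]
    · have hc' : G.contains g = false := by simpa using hc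
      rw [hc', PySem.Dict.contains_eq_decide_mem_keys, pv_keys_of_rel h,
        ← PySem.Dict.contains_eq_decide_mem_keys, hc']
  have hmod : G.modify g [] (· ++ tr) = G.insert g (G.getD g [] ++ tr) := rfl
  by_cases hc : G.contains g = true
  · rw [hmod, PySem.Dict.items_insert_of_contains C _ (by rw [hcontains]; exact hc),
      PySem.Dict.items_insert_of_contains G _ hc, h, List.map_map, List.map_map]
    apply List.map_congr_left
    intro p _
    by_cases hp : p.1 = g
    · simp [hp]
    · simp [hp]
  · have hc' : G.contains g = false := by simpa using hc
    rw [hmod, PySem.Dict.items_insert_of_not_contains C _ (by rw [hcontains]; exact hc'),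
      PySem.Dict.items_insert_of_not_contains G _ hc', h, List.map_append]
    rw [PySem.Dict.getD_of_not_contains G [] hc']
    rfl

theorem pv_rel_fold : ∀ (evs : List (Int × List Int)) (G : PySem.Dict Int (List Int))
    (C : PySem.Dict Int (PySem.Dict Int Int)), pvRel G C → G.keys.Nodup →
    pvRel (evs.foldl (fun d p => d.modify p.1 [] (· ++ p.2)) G)
        (evs.foldl (fun d p => d.insert p.1 (pvCounterUpd (d.getD p.1 PySem.Dict.empty) p.2)) C)
      ∧ (evs.foldl (fun d p => d.modify p.1 [] (· ++ p.2)) G).keys.Nodup := by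
  intro evs
  induction evs with
  | nil => intro G C h hn; exact ⟨h, hn⟩
  | cons p rest ih =>
    intro G C h hn
    simp only [List.foldl_cons]
    exact ih _ _ (pv_rel_step h hn p.1 p.2) (PySem.Dict.nodup_keys_insert G p.1 _ hn)

theorem pv_getD_fold_evs : ∀ (evs : List (Int × List Int)) (G : PySem.Dict Int (List Int)) (g : Int),
    (evs.foldl (fun d p => d.modify p.1 [] (· ++ p.2)) G).getD g []
      = G.getD g [] ++ (evs.filter (fun p => p.1 == g)).flatMap (·.2) := by
  intro evs
  induction evs with
  | nil => intro G g; simp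
  | cons p rest ih =>
    intro G g
    simp only [List.foldl_cons, List.filter_cons]
    rw [ih]
    by_cases hp : p.1 = g
    · subst hp
      rw [PySem.Dict.getD_modify]
      simp [List.append_assoc]
    · rw [PySem.Dict.getD_modify]
      rw [if_neg (fun hgp => hp hgp.symm)]
      simp [hp]

theorem pv_keys_fold_evs (evs : List (Int × List Int)) (G : PySem.Dict Int (List Int)) :
    (evs.foldl (fun d p => d.modify p.1 [] (· ++ p.2)) G).keys
      = PySem.Set.update G.keys (evs.map (·.1)) :=
  PySem.Dict.keys_foldl_insert_key evs (·.1) (fun d p => d.getD p.1 [] ++ p.2) G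

theorem pv_pyGet_zero {α : Type} (l : List α) : PySem.List.pyGet? l 0 = l.head? := by
  cases l <;> simp [PySem.List.pyGet?, PySem.List.pyIdx?]

theorem pv_head_foldl_insertBy {α : Type} (key : α → Int) :
    ∀ (l : List α) (b : α) (rest : List α),
    (l.foldl (fun acc x => PySem.List.insertBy (fun a b => decide (key b < key a)) x acc) (b :: rest)).head?
      = some (l.foldl (fun s x => if key s < key x then x else s) b) := by
  intro l
  induction l with
  | nil => intro b rest; rfl
  | cons x t ih =>
    intro b rest
    simp only [List.foldl_cons]
    by_cases h : key b < key x
    · rw [show PySem.List.insertBy (fun a b => decide (key b < key a)) x (b :: rest)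
          = x :: b :: rest by simp [PySem.List.insertBy, h], ih, if_pos h]
    · rw [show PySem.List.insertBy (fun a b => decide (key b < key a)) x (b :: rest)
          = b :: PySem.List.insertBy (fun a b => decide (key b < key a)) x rest by
          simp [PySem.List.insertBy, h], ih, if_neg h]

theorem pv_head_sorted_rev {α : Type} (key : α → Int) (c0 : α) (t : List α) :
    (PySem.List.sorted (c0 :: t) key true).head?
      = some (t.foldl (fun s x => if key s < key x then x else s) c0) := by
  rw [PySem.List.sorted_rev_eq_foldl_insertBy]
  simp only [List.foldl_cons]
  rw [show PySem.List.insertBy (fun a b => decide (key b < key a)) c0 ([] : List α) = [c0] by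
    simp [PySem.List.insertBy]]
  exact pv_head_foldl_insertBy key t c0 []

def pvBestMin (q : List (Int × Int)) : Int × Int :=
  match q with
  | [] => (0, 0)
  | c :: t => t.foldl (fun s x => if s.2 < x.2 then x else s) c

theorem pv_pairFM : ∀ (t : List (Int × Int)) (b x : Int × Int),
    t.foldl (fun s x => if s.2 < x.2 then x else s) (if b.2 < x.2 then x else b)
      = if b.2 < (t.foldl (fun s x => if s.2 < x.2 then x else s) x).2
        then t.foldl (fun s x => if s.2 < x.2 then x else s) x else b := by
  intro t
  induction t with
  | nil => intro b x; rfl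
  | cons y t ih =>
    intro b x
    simp only [List.foldl_cons]
    rw [ih (if b.2 < x.2 then x else b) y, ih x y]
    split_ifs <;> first | rfl | (exfalso; omega)

theorem pv_grp (g : Int) : ∀ (ct : List (Int × Int)) (c0 : Int × Int) (b : Int × Int × Int),
    (c0 :: ct).foldl (fun b p => if b.2.2 < p.2 then (g, p.1, p.2) else b) b
      = if b.2.2 < (pvBestMin (c0 :: ct)).2
        then (g, (pvBestMin (c0 :: ct)).1, (pvBestMin (c0 :: ct)).2) else b := by
  intro ct
  induction ct with
  | nil =>
    intro c0 b
    rfl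
  | cons x ct ih =>
    intro c0 b
    have hL : (c0 :: x :: ct).foldl (fun b p => if b.2.2 < p.2 then (g, p.1, p.2) else b) b
        = (x :: ct).foldl (fun b p => if b.2.2 < p.2 then (g, p.1, p.2) else b)
            (if b.2.2 < c0.2 then (g, c0.1, c0.2) else b) := rfl
    rw [hL, ih x]
    have hv : pvBestMin (c0 :: x :: ct) = if c0.2 < (pvBestMin (x :: ct)).2 then pvBestMin (x :: ct) else c0 := by
      simp only [pvBestMin, List.foldl_cons]
      exact pv_pairFM ct c0 x
    rw [hv]
    simp only [pvBestMin]
    split_ifs <;> first | rfl | (exfalso; simp only [] at *; omega)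

theorem pv_foldl_sel_mem : ∀ (t : List (Int × Int)) (c0 : Int × Int),
    t.foldl (fun s x => if s.2 < x.2 then x else s) c0 = c0
      ∨ t.foldl (fun s x => if s.2 < x.2 then x else s) c0 ∈ t := by
  intro t
  induction t with
  | nil => intro c0; exact Or.inl rfl
  | cons x t ih =>
    intro c0
    simp only [List.foldl_cons]
    by_cases h : c0.2 < x.2
    · rw [if_pos h]
      rcases ih x with h' | h'
      · exact Or.inr (by rw [h']; exact List.mem_cons_self)
      · exact Or.inr (List.mem_cons_of_mem _ h')
    · rw [if_neg h]
      rcases ih c0 with h' | h'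
      · exact Or.inl h'
      · exact Or.inr (List.mem_cons_of_mem _ h')

theorem pv_bestMin_pos (r : List Int) (hr : r ≠ []) : 1 ≤ (pvBestMin (PySem.Dict.counter r).items).2 := by
  have hitems : (PySem.Dict.counter r).items
      = (PySem.Set.ofList r).map (fun k => (k, (r.count k : Int))) := by
    simpa using PySem.Dict.items_counter r
  obtain ⟨a, t, hat⟩ := List.exists_cons_of_ne_nil hr
  have hmemS : a ∈ PySem.Set.ofList r := (PySem.Set.mem_ofList r a).mpr (by rw [hat]; exact List.mem_cons_self)
  obtain ⟨c0, ct, hct⟩ := List.exists_cons_of_ne_nil (l := (PySem.Dict.counter r).items)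
    (by rw [hitems]; exact fun hmap => by simp [List.map_eq_nil_iff] at hmap; simp [hmap] at hmemS)
  have hmem : pvBestMin (PySem.Dict.counter r).items ∈ (PySem.Dict.counter r).items := by
    rw [hct]
    simp only [pvBestMin]
    rcases pv_foldl_sel_mem ct c0 with h | h
    · rw [h]; exact List.mem_cons_self
    · exact List.mem_cons_of_mem _ h
  rw [hitems] at hmem
  obtain ⟨k, hk, hke⟩ := List.mem_map.mp hmem
  have hkr : k ∈ r := (PySem.Set.mem_ofList r k).mp hk
  have : 1 ≤ r.count k := List.one_le_count_iff.mpr hkr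
  rw [hitems, ← hke]
  simpa using this

-- counter items of a nonempty list are nonempty
theorem pv_counter_items_ne (r : List Int) (hr : r ≠ []) : (PySem.Dict.counter r).items ≠ [] := by
  have hitems : (PySem.Dict.counter r).items
      = (PySem.Set.ofList r).map (fun k => (k, (r.count k : Int))) := by
    simpa using PySem.Dict.items_counter r
  obtain ⟨a, t, hat⟩ := List.exists_cons_of_ne_nil hr
  have hmemS : a ∈ PySem.Set.ofList r := (PySem.Set.mem_ofList r a).mpr (by rw [hat]; exact List.mem_cons_self)
  rw [hitems]
  intro hmap
  rw [List.map_eq_nil_iff] at hmap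
  simp [hmap] at hmemS

-- ===== VERDICT (by name: the statement is the Claim_ definition above) =====
theorem strategy2_spec : Claim_equal_strategy2 := by
  intro inputs _ hpre
  unfold Spec_strategy2
  obtain ⟨hneS, hallS⟩ := hpre
  rw [pv_sleeps_eq inputs (-1)] at hneS hallS
  have hne : pvEvents (-1) inputs ≠ [] := by
    intro h; exact hneS (by rw [h]; rfl)
  have hall : ∀ p ∈ pvEvents (-1) inputs, ∃ q ∈ pvEvents (-1) inputs, q.1 = p.1 ∧ q.2 ≠ [] := by
    intro p hp
    obtain ⟨q', hq', hq'1, hq'2⟩ := hallS (p.1, decide (p.2 ≠ []))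
      (List.mem_map.mpr ⟨p, hp, rfl⟩)
    obtain ⟨q, hq, hqe⟩ := List.mem_map.mp hq'
    refine ⟨q, hq, ?_, ?_⟩
    · rw [← hqe] at hq'1; exact hq'1
    · rw [← hqe] at hq'2; simpa using hq'2
  simp only [strategy2, strategy2_alt]
  simp only [pvCounter_eq, pvSortedSnd_eq]
  rw [pv_dictA inputs (-1) PySem.Dict.empty, pv_dictB inputs (-1) PySem.Dict.empty]
  set evs := pvEvents (-1) inputs with hevs
  set G := evs.foldl (fun d p => d.modify p.1 [] (· ++ p.2)) PySem.Dict.empty with hG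
  set C := evs.foldl (fun d p => d.insert p.1 (pvCounterUpd (d.getD p.1 PySem.Dict.empty) p.2)) PySem.Dict.empty with hC
  obtain ⟨hrel, hnodup⟩ := pv_rel_fold evs PySem.Dict.empty PySem.Dict.empty rfl PySem.Dict.nodup_keys_empty
  have hkeys : G.keys = PySem.Set.ofList (evs.map (·.1)) := by
    rw [hG, pv_keys_fold_evs]; rfl
  have hgetD : ∀ g, G.getD g [] = (evs.filter (fun p => p.1 == g)).flatMap (·.2) := by
    intro g; rw [hG, pv_getD_fold_evs]; rw [PySem.Dict.getD_empty]; rfl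
  -- every stored minute list is nonempty
  have hval : ∀ p ∈ G.items, p.2 ≠ [] := by
    intro p hp
    rw [PySem.Dict.items_eq_map_keys G hnodup []] at hp
    obtain ⟨k, hk, hkp⟩ := List.mem_map.mp hp
    subst hkp
    rw [hkeys] at hk
    obtain ⟨q, hq, hq1⟩ := List.mem_map.mp ((PySem.Set.mem_ofList _ _).mp hk)
    obtain ⟨q', hq', hq'1, hq'2⟩ := hall q hq
    obtain ⟨x, hx⟩ := List.exists_mem_of_ne_nil _ hq'2
    have hxmem : x ∈ (evs.filter (fun p => p.1 == k)).flatMap (·.2) := by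
      refine List.mem_flatMap.mpr ⟨q', List.mem_filter.mpr ⟨hq', ?_⟩, hx⟩
      simp [hq'1, hq1]
    rw [hgetD k]
    exact List.ne_nil_of_mem hxmem
  have hitems_ne : G.items ≠ [] := by
    have : G.keys ≠ [] := by
      rw [hkeys]
      obtain ⟨q, t, hqt⟩ := List.exists_cons_of_ne_nil hne
      have : q.1 ∈ PySem.Set.ofList (evs.map (·.1)) :=
        (PySem.Set.mem_ofList _ _).mpr (List.mem_map.mpr ⟨q, by rw [hqt]; exact List.mem_cons_self, rfl⟩)
      exact List.ne_nil_of_mem this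
    intro h
    exact this (by simp [PySem.Dict.keys, h])
  -- A's per-guard pair is the explicit first-max of the counter items
  have hmapA : G.items.map (fun gr =>
        (gr.1, (PySem.List.pyGet? (PySem.List.sorted (PySem.Dict.counter gr.2).items (fun x => x.2) true) 0).getD (0, 0)))
      = G.items.map (fun p => (p.1, pvBestMin (PySem.Dict.counter p.2).items)) := by
    apply List.map_congr_left
    intro p hp
    obtain ⟨c0, ct, hct⟩ := List.exists_cons_of_ne_nil (pv_counter_items_ne p.2 (hval p hp))
    rw [hct, pv_pyGet_zero, pv_head_sorted_rev (fun x : Int × Int => x.2) c0 ct]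
    rfl
  rw [hmapA]
  -- B folds over the same per-guard pairs
  rw [hrel, List.foldl_map]
  have hcongr : ∀ (acc : Int × Int × Int), ∀ p ∈ G.items,
      (PySem.Dict.counter p.2).items.foldl
        (fun b q => if b.2.2 < q.2 then (p.1, q.1, q.2) else b) acc
      = (if acc.2.2 < (pvBestMin (PySem.Dict.counter p.2).items).2
          then (p.1, (pvBestMin (PySem.Dict.counter p.2).items).1, (pvBestMin (PySem.Dict.counter p.2).items).2)
          else acc) := by
    intro acc p hp
    obtain ⟨c0, ct, hct⟩ := List.exists_cons_of_ne_nil (pv_counter_items_ne p.2 (hval p hp))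
    rw [hct, pv_grp p.1 ct c0 acc, ← hct]
  rw [PySem.List.foldl_congr_mem G.items _ (fun b (p : Int × List Int) =>
      if b.2.2 < (pvBestMin (PySem.Dict.counter p.2).items).2
      then (p.1, (pvBestMin (PySem.Dict.counter p.2).items).1, (pvBestMin (PySem.Dict.counter p.2).items).2)
      else b) _ hcongr]
  -- turn the composed fold into a fold over the mapped list, then compare head-first
  rw [show (G.items.foldl (fun b (p : Int × List Int) =>
      if b.2.2 < (pvBestMin (PySem.Dict.counter p.2).items).2
      then (p.1, (pvBestMin (PySem.Dict.counter p.2).items).1, (pvBestMin (PySem.Dict.counter p.2).items).2)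
      else b) ((0 : Int), (0 : Int), (0 : Int)))
    = ((G.items.map (fun p => (p.1, pvBestMin (PySem.Dict.counter p.2).items))).foldl
        (fun b y => if b.2.2 < y.2.2 then (y.1, y.2.1, y.2.2) else b) ((0 : Int), (0 : Int), (0 : Int)))
    from (List.foldl_map
      (f := fun p : Int × List Int => (p.1, pvBestMin (PySem.Dict.counter p.2).items))
      (g := fun (b y : Int × Int × Int) => if b.2.2 < y.2.2 then (y.1, y.2.1, y.2.2) else b)
      (l := G.items) (init := ((0 : Int), (0 : Int), (0 : Int)))).symm]
  obtain ⟨s0, srest, hsort⟩ := List.exists_cons_of_ne_nil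
    (l := G.items.map (fun p => (p.1, pvBestMin (PySem.Dict.counter p.2).items)))
    (by intro h; rw [List.map_eq_nil_iff] at h; exact hitems_ne h)
  rw [hsort, pv_pyGet_zero, pv_head_sorted_rev (fun x : Int × Int × Int => x.2.2) s0 srest]
  have hs0 : (0 : Int) < s0.2.2 := by
    have : s0 ∈ G.items.map (fun p => (p.1, pvBestMin (PySem.Dict.counter p.2).items)) := by
      rw [hsort]; exact List.mem_cons_self
    obtain ⟨p0, hp0, hp0e⟩ := List.mem_map.mp this
    have h1 := pv_bestMin_pos p0.2 (hval p0 hp0)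
    have h2 : ((p0.1, pvBestMin (PySem.Dict.counter p0.2).items) : Int × Int × Int).2.2
        = (pvBestMin (PySem.Dict.counter p0.2).items).2 := rfl
    rw [← hp0e, h2]
    omega
  simp only [List.foldl_cons, Option.getD_some]
  rw [if_pos (show ((0 : Int), (0 : Int), (0 : Int)).2.2 < s0.2.2 from hs0)]
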